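-- pv_equiv track=rewrite | github.com/Anchovia/AnchoviaBOJ | Python/Pending/Silver/Silver5/2941.py | wordCheckFunc
-- ===== SOURCE A (Python) =====
-- def wordCheckFunc(strWord):
--     nowIndex = 0
--     result = 0
--
--     while(nowIndex < len(strWord) - 1):
--         nowWord = strWord[nowIndex]
--         nextWord = strWord[nowIndex + 1]
--
--         if(nowWord == 's' or nowWord == 'z'):
--             if(nextWord == '='):
--                 nowIndex += 2
--
--             else:
--                 nowIndex += 1
--
--         elif(nowWord == 'c'):
--             if(nextWord == '-'):
--                 nowIndex += 2
--
--             elif(nextWord == '='):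
--                 nowIndex += 2
--
--             else:
--                 nowIndex += 1
--
--         elif(nowWord == 'd'):
--             if(nextWord == '-'):
--                 nowIndex += 2
--
--             elif(nextWord == 'z'):
--                 try:
--                     nextWord = strWord[nowIndex + 2]
--
--                     if(nextWord == '='):
--                         nowIndex += 3
--
--                     else:
--                         nowIndex += 1
--
--                 except IndexError:
--                     nowIndex += 1
--
--             else:
--                 nowIndex += 1
--
--         elif(nowWord == 'l' or nowWord == 'n'):
--             if(nextWord == 'j'):
--                 nowIndex += 2
--
--             else:
--                 nowIndex += 1
--
--         else:
--             nowIndex += 1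
--
--         result += 1
--
--     if(nowIndex == len(strWord) - 1):
--         result += 1
--
--     else:
--         pass
--
--     return result
-- ===== SOURCE B (Python) =====
-- def wordCheckFunc(strWord):
--     # Token count = total length minus one saved character per multigraph occurrence.
--     # ('z=' also matched inside each 'dz=' accounts for dz='s second saved character.)
--     tokens = ('c=', 'c-', 'dz=', 'd-', 'lj', 'nj', 's=', 'z=')
--     return len(strWord) - sum(strWord.count(t) for t in tokens)
-- ===== Notes on version B (the rewrite author's own statement) =====
-- stated objective: faster
-- what changed: Replaced A's explicit index-advancing scanner (13 branches, try/except) with a closed formula: length minus the number of non-overlapping occurrences of each Croatian multigraph (the 'z=' count inside each 'dz=' supplies dz='s second saved character).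
import Mathlib
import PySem

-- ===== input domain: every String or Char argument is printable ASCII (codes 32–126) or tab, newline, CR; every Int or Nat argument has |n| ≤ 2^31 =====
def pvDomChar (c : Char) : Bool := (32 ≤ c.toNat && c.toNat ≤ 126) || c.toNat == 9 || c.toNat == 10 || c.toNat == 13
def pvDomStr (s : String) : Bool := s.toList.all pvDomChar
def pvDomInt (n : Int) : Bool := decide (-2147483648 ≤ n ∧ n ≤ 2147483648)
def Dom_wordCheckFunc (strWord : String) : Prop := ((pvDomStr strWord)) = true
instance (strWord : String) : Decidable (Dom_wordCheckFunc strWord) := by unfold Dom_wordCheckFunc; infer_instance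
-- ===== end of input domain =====

-- B replaces A's per-character index-advancing scanner by the closed formula
-- len(word) - Σ count(multigraph); same O(n), measurably faster constant factor in CPython.

-- ===== PORT A =====
-- the while loop of A: index nowIndex and accumulator result
def wordCheckLoop (s : List Char) (i : Nat) (result : Int) : Int :=
  if h : (i : Int) < (s.length : Int) - 1 then
    let nowWord := s.getD i ' '
    let nextWord := s.getD (i + 1) ' '
    if nowWord = 's' ∨ nowWord = 'z' then
      if nextWord = '=' then wordCheckLoop s (i + 2) (result + 1)
      else wordCheckLoop s (i + 1) (result + 1)
    else if nowWord = 'c' then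
      if nextWord = '-' then wordCheckLoop s (i + 2) (result + 1)
      else if nextWord = '=' then wordCheckLoop s (i + 2) (result + 1)
      else wordCheckLoop s (i + 1) (result + 1)
    else if nowWord = 'd' then
      if nextWord = '-' then wordCheckLoop s (i + 2) (result + 1)
      else if nextWord = 'z' then
        -- try: nextWord = strWord[nowIndex + 2]  (except IndexError → none)
        match PySem.List.pyGet? s ((i : Int) + 2) with
        | some c => if c = '=' then wordCheckLoop s (i + 3) (result + 1)
                    else wordCheckLoop s (i + 1) (result + 1)
        | none => wordCheckLoop s (i + 1) (result + 1)
      else wordCheckLoop s (i + 1) (result + 1)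
    else if nowWord = 'l' ∨ nowWord = 'n' then
      if nextWord = 'j' then wordCheckLoop s (i + 2) (result + 1)
      else wordCheckLoop s (i + 1) (result + 1)
    else wordCheckLoop s (i + 1) (result + 1)
  else
    if (i : Int) = (s.length : Int) - 1 then result + 1 else result
termination_by s.length - i
decreasing_by all_goals omega

def wordCheckFunc (strWord : String) : Int :=
  wordCheckLoop strWord.toList 0 0

-- ===== PORT B =====
def wordCheckFunc_alt (strWord : String) : Int :=
  (PySem.Str.len strWord : Int) -
    ((["c=", "c-", "dz=", "d-", "lj", "nj", "s=", "z="].map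
        (fun t => (PySem.Str.count strWord t : Int))).sum)

-- ===== PRECONDITION & SPEC =====
def Spec_wordCheckFunc (strWord : String) (out : Int) : Prop := out = wordCheckFunc_alt strWord
instance (strWord : String) (out : Int) : Decidable (Spec_wordCheckFunc strWord out) := by unfold Spec_wordCheckFunc; infer_instance

-- ===== CLAIM (what is proved, stated in full; the proofs are below) =====
def Claim_equal_wordCheckFunc : Prop := ∀ (strWord : String), Dom_wordCheckFunc strWord → Spec_wordCheckFunc strWord (wordCheckFunc strWord)

-- ===== LEMMAS AND PROOFS =====

lemma pvGo_nil (x : Char) (su : List Char) (f acc : Nat) :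
    PySem.Chars.count.go (x :: su) f [] acc = acc := by
  cases f <;> rw [PySem.Chars.count.go] <;> omega

lemma pvGo_cons (x c : Char) (su t : List Char) (f acc : Nat) :
    PySem.Chars.count.go (x :: su) (f + 1) (c :: t) acc =
      if (x :: su) <+: (c :: t) then
        PySem.Chars.count.go (x :: su) f ((c :: t).drop (x :: su).length) (acc + 1)
      else PySem.Chars.count.go (x :: su) f t acc := by
  rw [PySem.Chars.count.go]
  simp [List.isPrefixOf_iff_prefix]

lemma pvGo_acc (x : Char) (su : List Char) :
    ∀ (f : Nat) (l : List Char) (acc : Nat),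
      PySem.Chars.count.go (x :: su) f l acc = acc + PySem.Chars.count.go (x :: su) f l 0 := by
  intro f
  induction f with
  | zero => intro l acc; rw [PySem.Chars.count.go, PySem.Chars.count.go]; omega
  | succ f IH =>
    intro l acc
    cases l with
    | nil => rw [pvGo_nil, pvGo_nil]; omega
    | cons c t =>
      rw [pvGo_cons, pvGo_cons]
      by_cases hp : (x :: su) <+: (c :: t)
      · rw [if_pos hp, if_pos hp, IH _ (acc + 1), IH _ (0 + 1)]
        omega
      · rw [if_neg hp, if_neg hp]
        exact IH t acc

lemma pvGo_fuel (x : Char) (su : List Char) :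
    ∀ (f : Nat) (l : List Char) (acc : Nat), l.length ≤ f →
      PySem.Chars.count.go (x :: su) f l acc = PySem.Chars.count.go (x :: su) l.length l acc := by
  intro f
  induction f using Nat.strong_induction_on with
  | _ f IH =>
  intro l acc hl
  cases f with
  | zero =>
    have : l = [] := List.eq_nil_of_length_eq_zero (Nat.le_zero.mp hl)
    subst this; rfl
  | succ f =>
    cases l with
    | nil => rw [pvGo_nil, pvGo_nil]
    | cons c t =>
      simp only [List.length_cons] at hl ⊢
      rw [pvGo_cons, pvGo_cons]
      by_cases hp : (x :: su) <+: (c :: t)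
      · rw [if_pos hp, if_pos hp]
        have hdl : ((c :: t).drop (x :: su).length).length ≤ t.length := by
          simp [List.length_drop]
        rw [IH f (by omega) _ _ (by omega), IH t.length (by omega) _ _ hdl]
      · rw [if_neg hp, if_neg hp]
        rw [IH f (by omega) t acc (by simp at hl; omega),
            IH t.length (by omega) t acc (le_refl _)]

lemma pvCount_nil (x : Char) (su : List Char) : PySem.Chars.count [] (x :: su) = 0 := by
  rw [PySem.Chars.count]
  simp [pvGo_nil]

lemma pvCount_cons_step (x c : Char) (su t : List Char) :
    PySem.Chars.count (c :: t) (x :: su) =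
      if (x :: su) <+: (c :: t) then
        1 + PySem.Chars.count ((c :: t).drop (su.length + 1)) (x :: su)
      else PySem.Chars.count t (x :: su) := by
  rw [PySem.Chars.count]
  simp only [List.isEmpty_cons, Bool.false_eq_true, if_false, List.length_cons]
  rw [pvGo_cons]
  by_cases hp : (x :: su) <+: (c :: t)
  · rw [if_pos hp, if_pos hp]
    have hlen : ((c :: t).drop (x :: su).length).length ≤ t.length := by
      simp [List.length_drop]
    rw [pvGo_acc, pvGo_fuel x su t.length _ _ hlen]
    rw [PySem.Chars.count]
    simp [List.length_cons]
  · rw [if_neg hp, if_neg hp]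
    rw [PySem.Chars.count]
    simp

def pvC (l t : List Char) : Int := (PySem.Chars.count l t : Int)
def pvF (l : List Char) : Int :=
  (l.length : Int) -
    (pvC l ['c', '='] + pvC l ['c', '-'] + pvC l ['d', 'z', '='] + pvC l ['d', '-'] +
      pvC l ['l', 'j'] + pvC l ['n', 'j'] + pvC l ['s', '='] + pvC l ['z', '='])

-- A's loop computes result + pvF of the unread suffix
lemma pvLoop_eq :
    ∀ (n : Nat) (s : List Char) (i : Nat) (result : Int), s.length ≤ i + n →
      wordCheckLoop s i result = result + pvF (s.drop i) := by
  intro n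
  induction n using Nat.strong_induction_on with
  | _ n IH =>
  intro s i result hn
  rw [wordCheckLoop]
  by_cases hlt : (i : Int) < (s.length : Int) - 1
  · rw [dif_pos hlt]
    have hi : i < s.length := by omega
    have hi1 : i + 1 < s.length := by omega
    have hga : s.getD i ' ' = s[i] := List.getD_eq_getElem s ' ' hi
    have hgb : s.getD (i + 1) ' ' = s[i + 1] := List.getD_eq_getElem s ' ' hi1
    have hd0 : s.drop i = s[i] :: s.drop (i + 1) := List.drop_eq_getElem_cons hi
    have hd1 : s.drop (i + 1) = s[i + 1] :: s.drop (i + 2) := List.drop_eq_getElem_cons hi1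
    simp only [hga, hgb]
    by_cases h1 : s[i] = 's' ∨ s[i] = 'z'
    · rw [if_pos h1]
      by_cases h2 : s[i + 1] = '='
      · rw [if_pos h2,
            IH (n - 2) (by omega) s (i + 2) (result + 1) (by omega),
            hd0, hd1, h2]
        rcases h1 with h1 | h1 <;>
          · rw [h1]
            simp [-List.getElem_cons_drop, pvF, pvC, pvCount_cons_step, List.cons_prefix_cons, List.prefix_nil,
              pvCount_nil]
            push_cast
            ring
      · rw [if_neg h2,
            IH (n - 1) (by omega) s (i + 1) (result + 1) (by omega),
            hd0, hd1]
        rcases h1 with h1 | h1 <;>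
          · rw [h1]
            simp [-List.getElem_cons_drop, pvF, pvC, pvCount_cons_step, List.cons_prefix_cons, List.prefix_nil,
              pvCount_nil, h2, Ne.symm h2]
            push_cast
            ring
    · rw [if_neg h1]
      push_neg at h1
      obtain ⟨h1s, h1z⟩ := h1
      by_cases h2 : s[i] = 'c'
      · rw [if_pos h2]
        by_cases h3 : s[i + 1] = '-'
        · rw [if_pos h3,
              IH (n - 2) (by omega) s (i + 2) (result + 1) (by omega),
              hd0, hd1, h2, h3]
          simp [-List.getElem_cons_drop, pvF, pvC, pvCount_cons_step, List.cons_prefix_cons, List.prefix_nil,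
            pvCount_nil]
          push_cast
          ring
        · rw [if_neg h3]
          by_cases h4 : s[i + 1] = '='
          · rw [if_pos h4,
                IH (n - 2) (by omega) s (i + 2) (result + 1) (by omega),
                hd0, hd1, h2, h4]
            simp [-List.getElem_cons_drop, pvF, pvC, pvCount_cons_step, List.cons_prefix_cons, List.prefix_nil,
              pvCount_nil]
            push_cast
            ring
          · rw [if_neg h4,
                IH (n - 1) (by omega) s (i + 1) (result + 1) (by omega),
                hd0, hd1, h2]
            simp [-List.getElem_cons_drop, pvF, pvC, pvCount_cons_step, List.cons_prefix_cons, List.prefix_nil,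
              pvCount_nil, h3, Ne.symm h3, h4, Ne.symm h4]
            push_cast
            ring
      · rw [if_neg h2]
        by_cases h3 : s[i] = 'd'
        · rw [if_pos h3]
          by_cases h4 : s[i + 1] = '-'
          · rw [if_pos h4,
                IH (n - 2) (by omega) s (i + 2) (result + 1) (by omega),
                hd0, hd1, h3, h4]
            simp [-List.getElem_cons_drop, pvF, pvC, pvCount_cons_step, List.cons_prefix_cons, List.prefix_nil,
              pvCount_nil]
            push_cast
            ring
          · rw [if_neg h4]
            by_cases h5 : s[i + 1] = 'z'
            · rw [if_pos h5]
              have hcast : ((i : Int) + 2) = ((i + 2 : Nat) : Int) := by push_cast; ring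
              rw [hcast, PySem.List.pyGet?_natCast]
              cases hopt : s[i + 2]? with
              | some c =>
                obtain ⟨h6, hc⟩ := List.getElem?_eq_some_iff.mp hopt
                have hd2 : s.drop (i + 2) = c :: s.drop (i + 3) := by
                  rw [List.drop_eq_getElem_cons h6, hc]
                change (if c = '=' then wordCheckLoop s (i + 3) (result + 1)
                    else wordCheckLoop s (i + 1) (result + 1)) = result + pvF (List.drop i s)
                by_cases h7 : c = '='
                · rw [if_pos h7,
                      IH (n - 3) (by omega) s (i + 3) (result + 1) (by omega),
                      hd0, hd1, hd2, h3, h5, h7]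
                  simp [-List.getElem_cons_drop, pvF, pvC, pvCount_cons_step, List.cons_prefix_cons, List.prefix_nil,
                    pvCount_nil]
                  push_cast
                  ring
                · rw [if_neg h7,
                      IH (n - 1) (by omega) s (i + 1) (result + 1) (by omega),
                      hd0, hd1, hd2, h3, h5]
                  simp [-List.getElem_cons_drop, pvF, pvC, pvCount_cons_step, List.cons_prefix_cons, List.prefix_nil,
                    pvCount_nil, h7, Ne.symm h7]
                  push_cast
                  ring
              | none =>
                have h6 : s.length ≤ i + 2 := by
                  simpa [List.getElem?_eq_none_iff] using hopt
                have hd2 : s.drop (i + 2) = [] := by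
                  rw [List.drop_eq_nil_iff]; omega
                rw [IH (n - 1) (by omega) s (i + 1) (result + 1) (by omega),
                    hd0, hd1, hd2, h3, h5]
                simp [-List.getElem_cons_drop, pvF, pvC, pvCount_cons_step, List.cons_prefix_cons, List.prefix_nil,
                  pvCount_nil]
                push_cast
                ring
            · rw [if_neg h5,
                  IH (n - 1) (by omega) s (i + 1) (result + 1) (by omega),
                  hd0, hd1, h3]
              simp [-List.getElem_cons_drop, pvF, pvC, pvCount_cons_step, List.cons_prefix_cons, List.prefix_nil,
                pvCount_nil, h4, Ne.symm h4, h5, Ne.symm h5]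
              push_cast
              ring
        · rw [if_neg h3]
          by_cases h4 : s[i] = 'l' ∨ s[i] = 'n'
          · rw [if_pos h4]
            by_cases h5 : s[i + 1] = 'j'
            · rw [if_pos h5,
                  IH (n - 2) (by omega) s (i + 2) (result + 1) (by omega),
                  hd0, hd1, h5]
              rcases h4 with h4 | h4 <;>
                · rw [h4]
                  simp [-List.getElem_cons_drop, pvF, pvC, pvCount_cons_step, List.cons_prefix_cons, List.prefix_nil,
                    pvCount_nil]
                  push_cast
                  ring
            · rw [if_neg h5,
                  IH (n - 1) (by omega) s (i + 1) (result + 1) (by omega),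
                  hd0, hd1]
              rcases h4 with h4 | h4 <;>
                · rw [h4]
                  simp [-List.getElem_cons_drop, pvF, pvC, pvCount_cons_step, List.cons_prefix_cons, List.prefix_nil,
                    pvCount_nil, h5, Ne.symm h5]
                  push_cast
                  ring
          · rw [if_neg h4]
            push_neg at h4
            obtain ⟨h4l, h4n⟩ := h4
            rw [IH (n - 1) (by omega) s (i + 1) (result + 1) (by omega), hd0, hd1]
            simp [-List.getElem_cons_drop, pvF, pvC, pvCount_cons_step, List.cons_prefix_cons, List.prefix_nil,
              pvCount_nil, h1s, Ne.symm h1s, h1z, Ne.symm h1z, h2, Ne.symm h2,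
              h3, Ne.symm h3, h4l, Ne.symm h4l, h4n, Ne.symm h4n]
            push_cast
            ring
  · rw [dif_neg hlt]
    by_cases heq : (i : Int) = (s.length : Int) - 1
    · rw [if_pos heq]
      have hi : i < s.length := by omega
      have hd0 : s.drop i = s[i] :: s.drop (i + 1) := List.drop_eq_getElem_cons hi
      have hd1 : s.drop (i + 1) = [] := by rw [List.drop_eq_nil_iff]; omega
      rw [hd0, hd1]
      simp [-List.getElem_cons_drop, pvF, pvC, pvCount_cons_step, List.cons_prefix_cons, List.prefix_nil, pvCount_nil]
    · rw [if_neg heq]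
      have hd : s.drop i = [] := by rw [List.drop_eq_nil_iff]; omega
      rw [hd]
      simp [pvF, pvC, pvCount_nil]

-- ===== VERDICT (by name: the statement is the Claim_ definition above) =====
theorem wordCheckFunc_spec : Claim_equal_wordCheckFunc := by
  intro s _hDom
  unfold Spec_wordCheckFunc wordCheckFunc wordCheckFunc_alt
  rw [pvLoop_eq s.toList.length s.toList 0 0 (by omega)]
  simp only [List.drop_zero, pvF, pvC, zero_add, List.map_cons, List.map_nil,
    List.sum_cons, List.sum_nil, PySem.Str.count_eq, PySem.Str.len_eq]
  push_cast
  ring
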